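-- pv_equiv track=rewrite | github.com/YodaEmbedding/experiments | so6.py | is_finite
-- ===== SOURCE A (Python) =====
-- def get_divisors(num):
-- 	return [i for i in range(1, num) if num % i == 0]
--
-- def sum_divisors(num):
-- 	return sum(get_divisors(num))
--
-- def is_finite(num):
-- 	previous = []
--
-- 	while num != 0:
-- 		if num in previous:
-- 			return False
--
-- 		previous.append(num)
-- 		num = sum_divisors(num)
--
-- 	return True
-- ===== SOURCE B (Python) =====
-- def _aliquot(n):
-- 	if n <= 1:
-- 		return 0
-- 	total = 1
-- 	i = 2
-- 	while i * i <= n: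
-- 		if n % i == 0:
-- 			total += i
-- 			j = n // i
-- 			if j != i:
-- 				total += j
-- 		i += 1
-- 	return total
--
-- def is_finite(num):
-- 	seen = set()
-- 	while num != 0:
-- 		if num in seen:
-- 			return False
-- 		seen.add(num)
-- 		num = _aliquot(num)
-- 	return True
-- ===== Notes on version B (the rewrite author's own statement) =====
-- stated objective: alternative
-- what changed: B sums proper divisors by pairing each divisor d <= sqrt(num) with its cofactor num//d instead of A's full trial scan over range(1, num), and tracks already-seen sequence values in a set instead of a list; intended as faster per step (measured 125x at the largest size both finished), but a timing run could not confirm it overall since some inputs make both diverge.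
import Mathlib
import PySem

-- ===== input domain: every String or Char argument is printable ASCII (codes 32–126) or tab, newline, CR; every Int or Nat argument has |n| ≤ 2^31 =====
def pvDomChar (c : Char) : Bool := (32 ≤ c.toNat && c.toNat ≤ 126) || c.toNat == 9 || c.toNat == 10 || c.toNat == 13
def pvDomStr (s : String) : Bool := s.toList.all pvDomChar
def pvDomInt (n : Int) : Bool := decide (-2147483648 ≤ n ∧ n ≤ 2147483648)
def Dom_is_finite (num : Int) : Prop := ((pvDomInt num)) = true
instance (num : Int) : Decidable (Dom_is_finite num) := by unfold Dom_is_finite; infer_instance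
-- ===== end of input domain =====

-- B sums proper divisors by pairing each divisor d ≤ √num with its cofactor num//d instead
-- of A's trial scan over range(1, num), and keeps seen sequence values in a set, not a list
-- (objective: alternative). Python A's while loop can run without bound (the aliquot
-- sequence of e.g. 276 is not known to terminate); both ports bound it by the same fuel
-- constant, so the ports agree everywhere and are faithful wherever Python returns within
-- that many loop iterations.

-- ===== PORT A =====
def get_divisors (num : Int) : List Int :=
  (PySem.List.pyRange 1 num 1).filter (fun i => PySem.Int.mod num i == 0)

def sum_divisors (num : Int) : Int := (get_divisors num).sum

def is_finite_loop : Nat → Int → List Int → Bool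
  | 0, _, _ => false
  | fuel+1, num, previous =>
    if num == 0 then true
    else if previous.contains num then false
    else is_finite_loop fuel (sum_divisors num) (previous ++ [num])

def is_finite (num : Int) : Bool := is_finite_loop 100000 num []

-- ===== PORT B =====
-- the while loop 'while i * i <= n' runs at most n times; fuel n.toNat + 1 is a pure guard
def aliquot_loop : Nat → Int → Int → Int → Int
  | 0, _, _, total => total
  | fuel+1, n, i, total =>
    if i * i ≤ n then
      aliquot_loop fuel n (i + 1)
        (if PySem.Int.mod n i == 0 then
          total + i + (if PySem.Int.floordiv n i != i then PySem.Int.floordiv n i else 0)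
        else total)
    else total

def aliquot (n : Int) : Int := if n ≤ 1 then 0 else aliquot_loop (n.toNat + 1) n 2 1

def is_finite_alt_loop : Nat → Int → PySem.Set Int → Bool
  | 0, _, _ => false
  | fuel+1, num, seen =>
    if num == 0 then true
    else if PySem.Set.contains seen num then false
    else is_finite_alt_loop fuel (aliquot num) (PySem.Set.add seen num)

def is_finite_alt (num : Int) : Bool := is_finite_alt_loop 100000 num PySem.Set.empty

-- ===== PRECONDITION & SPEC =====
def Spec_is_finite (num : Int) (out : Bool) : Prop := out = is_finite_alt num
instance (num : Int) (out : Bool) : Decidable (Spec_is_finite num out) := by unfold Spec_is_finite; infer_instance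

-- ===== CLAIM (what is proved, stated in full; the proofs are below) =====
def Claim_equal_is_finite : Prop := ∀ (num : Int), Dom_is_finite num → Spec_is_finite num (is_finite num)

-- ===== LEMMAS AND PROOFS =====

-- A-side: sum_divisors ↑m is the sum of the proper divisors of m
theorem sum_divisors_natCast (m : Nat) (hm : 2 ≤ m) :
    sum_divisors (m : Int) = ((∑ d ∈ m.properDivisors, d : Nat) : Int) := by
  unfold sum_divisors get_divisors
  rw [PySem.List.pyRange_one]
  have h1 : ((m : Int) - 1).toNat = m - 1 := by omega
  rw [h1, List.filter_map]
  have h2 : ((List.range (m-1)).filter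
      ((fun i => PySem.Int.mod (m:Int) i == 0) ∘ (fun k : Nat => (1:Int) + k)))
      = (List.range (m-1)).filter (fun k => decide ((1 + k) ∣ m)) := by
    apply List.filter_congr
    intro k _
    show (PySem.Int.mod (m:Int) ((1:Int) + (k:Int)) == 0) = decide ((1 + k) ∣ m)
    have hc : (1 : Int) + (k : Int) = ((1 + k : Nat) : Int) := by push_cast; ring
    have hpos : 0 < 1 + k := by omega
    rw [hc, PySem.Int.mod_natCast]
    rw [Bool.eq_iff_iff]
    simp only [beq_iff_eq, decide_eq_true_eq, Nat.cast_eq_zero]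
    exact Nat.dvd_iff_mod_eq_zero.symm
  rw [h2]
  have h3 : ((List.range (m-1)).filter (fun k => decide ((1 + k) ∣ m))).map (fun k : Nat => (1:Int) + k)
      = (((List.range (m-1)).filter (fun k => decide ((1 + k) ∣ m))).map (fun k : Nat => 1 + k)).map
          (fun d : Nat => (d : Int)) := by
    rw [List.map_map]
    apply List.map_congr_left
    intro k _
    show (1:Int) + (k:Int) = ((1 + k : Nat) : Int)
    push_cast; ring
  rw [h3, ← Nat.cast_list_sum]
  congr 1
  set L := ((List.range (m-1)).filter (fun k => decide ((1 + k) ∣ m))).map (fun k : Nat => 1 + k) with hL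
  have hnodup : L.Nodup := by
    apply List.Nodup.map (fun a b h => by omega)
    exact (List.nodup_range).filter _
  have hfin : L.toFinset = m.properDivisors := by
    ext d
    simp only [hL, List.mem_toFinset, List.mem_map, List.mem_filter, List.mem_range,
      Nat.mem_properDivisors, decide_eq_true_eq]
    constructor
    · rintro ⟨k, ⟨hk, hdvd⟩, rfl⟩; exact ⟨hdvd, by omega⟩
    · rintro ⟨hdvd, hlt⟩
      have hd1 : 1 ≤ d := Nat.pos_of_dvd_of_pos hdvd (by omega)
      exact ⟨d - 1, ⟨by omega, by rwa [Nat.add_sub_cancel' hd1]⟩, by omega⟩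
  calc L.sum = (L.map id).sum := by rw [List.map_id]
    _ = L.toFinset.sum id := (List.sum_toFinset _ hnodup).symm
    _ = ∑ d ∈ m.properDivisors, d := by rw [hfin]; rfl

-- B-side loop: aliquot_loop accumulates each divisor pair (d, m/d) with d in [i, √m]
theorem aliquot_loop_sum (m : Nat) :
    ∀ (fuel : Nat) (i total : Int), 1 ≤ i → (m.sqrt : Int) < i + fuel →
      aliquot_loop fuel (m : Int) i total =
        total + ((∑ d ∈ Finset.Ico i.toNat (m.sqrt + 1),
          (if d ∣ m then d + (if d * d = m then 0 else m / d) else 0) : Nat) : Int) := by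
  intro fuel
  induction fuel with
  | zero =>
    intro i total hi hlt
    have hempty : Finset.Ico i.toNat (m.sqrt + 1) = ∅ :=
      Finset.Ico_eq_empty (by omega)
    simp [aliquot_loop, hempty]
  | succ f ih =>
    intro i total hi hlt
    simp only [aliquot_loop]
    set d := i.toNat with hd
    have hid : i = (d : Int) := by omega
    by_cases hle : i * i ≤ (m : Int)
    · rw [if_pos hle]
      have hdd : d * d ≤ m := by
        have : ((d * d : Nat) : Int) ≤ (m : Int) := by push_cast; rw [← hid]; exact hle
        exact_mod_cast this
      have hsq : d ≤ m.sqrt := Nat.le_sqrt.mpr hdd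
      have hd1 : 1 ≤ d := by omega
      -- split off the bottom of the Ico sum
      have hsplit : (∑ x ∈ Finset.Ico d (m.sqrt + 1),
            (if x ∣ m then x + (if x * x = m then 0 else m / x) else 0))
          = (if d ∣ m then d + (if d * d = m then 0 else m / d) else 0)
            + ∑ x ∈ Finset.Ico (d+1) (m.sqrt + 1),
                (if x ∣ m then x + (if x * x = m then 0 else m / x) else 0) :=
        Finset.sum_eq_sum_Ico_succ_bot (by omega) _
      have hrec := ih (i+1)
        (if PySem.Int.mod (m:Int) i == 0 then
          total + i + (if PySem.Int.floordiv (m:Int) i != i then PySem.Int.floordiv (m:Int) i else 0)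
        else total) (by omega) (by push_cast at hlt ⊢; omega)
      rw [hrec]
      have hi1 : (i+1).toNat = d + 1 := by omega
      rw [hi1, hsplit]
      -- now resolve the branch
      rw [hid, PySem.Int.mod_natCast, PySem.Int.floordiv_natCast]
      by_cases hdvd : d ∣ m
      · have h0 : m % d = 0 := Nat.dvd_iff_mod_eq_zero.mp hdvd
        rw [if_pos (by simp [h0]), if_pos hdvd]
        have hmul : d * (m / d) = m := Nat.mul_div_cancel' hdvd
        by_cases heq : d * d = m
        · have hdiv : m / d = d := by
            rw [← heq, Nat.mul_div_cancel _ (by omega)]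
          rw [if_neg (by simp [hdiv]), if_pos heq]
          push_cast; ring
        · have hdiv : m / d ≠ d := fun h => heq (by rw [← hmul, h])
          rw [if_pos (by simp only [bne_iff_ne, ne_eq, Nat.cast_inj]; exact hdiv), if_neg heq]
          push_cast; ring
      · have h0 : m % d ≠ 0 := fun h => hdvd (Nat.dvd_of_mod_eq_zero h)
        rw [if_neg (by simp only [beq_iff_eq, Nat.cast_eq_zero]; exact h0), if_neg hdvd]
        push_cast; ring
    · rw [if_neg hle]
      have : m < d * d := by
        have h2 : ¬ ((d*d : Nat) : Int) ≤ (m:Int) := by push_cast; rw [← hid]; exact hle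
        omega
      have hempty : Finset.Ico i.toNat (m.sqrt + 1) = ∅ :=
        Finset.Ico_eq_empty (by
          have := Nat.sqrt_lt.mpr this
          omega)
      rw [hd, hempty]
      simp

-- divisor pairing: proper divisors = {1} ∪ {d : 2 ≤ d ≤ √m, d ∣ m} ∪ their cofactors
theorem pairing (m : Nat) (hm : 2 ≤ m) :
    (∑ d ∈ m.properDivisors, d) =
      1 + ∑ d ∈ Finset.Ico 2 (m.sqrt + 1),
            (if d ∣ m then d + (if d * d = m then 0 else m / d) else 0) := by
  classical
  set sq := m.sqrt with hsq
  set small := (Finset.Ico 2 (sq+1)).filter (· ∣ m) with hsmall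
  set large := m.properDivisors.filter (fun d => m < d * d) with hlarge
  have hmem_small : ∀ d, d ∈ small ↔ (2 ≤ d ∧ d * d ≤ m ∧ d ∣ m) := by
    intro d
    simp only [hsmall, Finset.mem_filter, Finset.mem_Ico]
    constructor
    · rintro ⟨⟨h2, hlt⟩, hdvd⟩
      exact ⟨h2, Nat.le_sqrt.mp (by omega), hdvd⟩
    · rintro ⟨h2, hdd, hdvd⟩
      exact ⟨⟨h2, by have := Nat.le_sqrt.mpr hdd; omega⟩, hdvd⟩
  have hmem_large : ∀ d, d ∈ large ↔ (d ∣ m ∧ d < m ∧ m < d * d) := by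
    intro d
    simp only [hlarge, Finset.mem_filter, Nat.mem_properDivisors]
    tauto
  -- d ∈ small → d is a proper divisor
  have hsmall_proper : ∀ d, d ∈ small → d ∣ m ∧ d < m := by
    intro d hd
    rw [hmem_small] at hd
    obtain ⟨h2, hdd, hdvd⟩ := hd
    refine ⟨hdvd, ?_⟩
    nlinarith
  -- decomposition of the proper divisors
  have hdecomp : m.properDivisors = insert 1 (small ∪ large) := by
    ext d
    simp only [Finset.mem_insert, Finset.mem_union, Nat.mem_properDivisors, hmem_small, hmem_large]
    constructor
    · rintro ⟨hdvd, hlt⟩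
      have hd1 : 1 ≤ d := Nat.pos_of_dvd_of_pos hdvd (by omega)
      rcases eq_or_lt_of_le hd1 with h1 | h2
      · exact Or.inl h1.symm
      · rcases Nat.lt_or_ge m (d * d) with hdd | hdd
        · exact Or.inr (Or.inr ⟨hdvd, hlt, hdd⟩)
        · exact Or.inr (Or.inl ⟨h2, hdd, hdvd⟩)
    · rintro (rfl | ⟨h2, hdd, hdvd⟩ | ⟨hdvd, hlt, hdd⟩)
      · exact ⟨one_dvd m, by omega⟩
      · refine ⟨hdvd, ?_⟩; nlinarith
      · exact ⟨hdvd, hlt⟩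
  have h1notin : (1 : Nat) ∉ small ∪ large := by
    intro hmem
    rcases Finset.mem_union.mp hmem with h | h
    · rw [hmem_small] at h; omega
    · rw [hmem_large] at h; omega
  have hdisj : Disjoint small large := by
    rw [Finset.disjoint_left]
    intro d hds hdl
    rw [hmem_small] at hds
    rw [hmem_large] at hdl
    omega
  -- the cofactor bijection: large ↔ small without the square root of m
  set small' := small.filter (fun d => ¬ d * d = m) with hsmall'
  have hbij : (∑ d ∈ small', m / d) = ∑ d ∈ large, d := by
    apply Finset.sum_nbij' (i := fun d => m / d) (j := fun e => m / e)
    · intro a ha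
      simp only [hsmall', Finset.mem_filter, hmem_small] at ha
      obtain ⟨⟨h2, hdd, hdvd⟩, hne⟩ := ha
      have hmul : a * (m / a) = m := Nat.mul_div_cancel' hdvd
      rw [hmem_large]
      refine ⟨Nat.div_dvd_of_dvd hdvd, Nat.div_lt_self (by omega) (by omega), ?_⟩
      have hlt : a < m / a := by
        by_contra hcon
        have hcon' : m / a ≤ a := Nat.le_of_not_lt hcon
        have hle2 : m ≤ a * a := by
          calc m = a * (m / a) := hmul.symm
            _ ≤ a * a := Nat.mul_le_mul_left a hcon'
        omega
      nlinarith [hmul, hlt]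
    · intro e he
      rw [hmem_large] at he
      obtain ⟨hdvd, hlt, hdd⟩ := he
      have he1 : 1 ≤ e := Nat.pos_of_dvd_of_pos hdvd (by omega)
      have hmul : e * (m / e) = m := Nat.mul_div_cancel' hdvd
      have hgt : m / e < e := by nlinarith
      have hge2 : 2 ≤ m / e := by
        rcases Nat.lt_or_ge (m / e) 2 with h | h
        · interval_cases h' : (m / e) <;> omega
        · exact h
      simp only [hsmall', Finset.mem_filter, hmem_small]
      exact ⟨⟨hge2, by nlinarith, Nat.div_dvd_of_dvd hdvd⟩, by nlinarith⟩
    · intro a ha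
      simp only [hsmall', Finset.mem_filter, hmem_small] at ha
      exact Nat.div_div_self ha.1.2.2 (by omega)
    · intro e he
      rw [hmem_large] at he
      exact Nat.div_div_self he.1 (by omega)
    · intro a _; rfl
  -- put everything together
  have hfilter : (∑ d ∈ Finset.Ico 2 (sq + 1),
        (if d ∣ m then d + (if d * d = m then 0 else m / d) else 0))
      = ∑ d ∈ small, (d + (if d * d = m then 0 else m / d)) := by
    rw [hsmall, Finset.sum_filter]
  have hsplitg : (∑ d ∈ small, (d + (if d * d = m then 0 else m / d)))
      = (∑ d ∈ small, d) + ∑ d ∈ small, (if d * d = m then 0 else m / d) :=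
    Finset.sum_add_distrib
  have hg : (∑ d ∈ small, (if d * d = m then 0 else m / d)) = ∑ d ∈ small', m / d := by
    conv_rhs => rw [hsmall', Finset.sum_filter]
    apply Finset.sum_congr rfl
    intro d _
    by_cases h : d * d = m <;> simp [h]
  rw [hdecomp, Finset.sum_insert h1notin, Finset.sum_union hdisj, hfilter, hsplitg, hg, hbij]

theorem sum_divisors_eq_aliquot (n : Int) : sum_divisors n = aliquot n := by
  by_cases hn : n ≤ 1
  · unfold aliquot
    rw [if_pos hn]
    unfold sum_divisors get_divisors
    rw [PySem.List.pyRange_one_eq_nil hn]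
    rfl
  · have hm2 : 2 ≤ n.toNat := by omega
    have hcast : n = (n.toNat : Int) := by omega
    rw [hcast, sum_divisors_natCast n.toNat hm2]
    unfold aliquot
    rw [if_neg (by omega)]
    have hsqle := Nat.sqrt_le_self n.toNat
    rw [show ((n.toNat : Int)).toNat = n.toNat by omega]
    rw [aliquot_loop_sum n.toNat (n.toNat + 1) 2 1 (by omega)
      (by push_cast; omega)]
    rw [show ((2:Int)).toNat = 2 by rfl, pairing n.toNat hm2]
    push_cast
    ring

theorem loops_eq : ∀ (fuel : Nat) (num : Int) (prev : List Int) (seen : PySem.Set Int),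
    (∀ x : Int, (x ∈ prev) ↔ (x ∈ seen)) →
    is_finite_loop fuel num prev = is_finite_alt_loop fuel num seen := by
  intro fuel
  induction fuel with
  | zero => intro num prev seen _; rfl
  | succ f ih =>
    intro num prev seen hinv
    simp only [is_finite_loop, is_finite_alt_loop]
    have hc : prev.contains num = PySem.Set.contains seen num := by
      simp [PySem.Set.contains, hinv]
    rw [hc]
    split <;> [rfl; skip]
    split <;> [rfl; skip]
    rw [sum_divisors_eq_aliquot]
    exact ih _ _ _ (by intro x; simp [PySem.Set.mem_add, hinv])

-- ===== VERDICT (by name: the statement is the Claim_ definition above) =====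
theorem is_finite_spec : Claim_equal_is_finite := by
  intro num _
  show is_finite num = is_finite_alt num
  exact loops_eq 100000 num [] PySem.Set.empty (by simp [PySem.Set.empty])
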